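-- pv_equiv track=rewrite | github.com/SemiSimpleMath/wordle | prune.py | initial_prune
-- ===== SOURCE A (Python) =====
-- def initial_prune(contains_dicts, correct_letters_wrong_place, correct_letters_exact_place):
--     letters = []
--
--
--     for i, val in enumerate(correct_letters_wrong_place):
--         let = val[1]
--         letters.append(let)
--
--     for i, val in enumerate(correct_letters_exact_place):
--         let = val[1]
--         letters.append(let)
--
--     d = contains_shrink(contains_dicts, letters)
--
--     return d
--
-- def contains_shrink(contains_dicts, let):
--
--     f = ord(let[0])-ord('a')
--
--     d = contains_dicts[f].copy()
--
--     for i in range (1, len(let)):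
--         l = ord(let[i]) - ord('a')
--         d=d.intersection(contains_dicts[l])
--     return d
-- ===== SOURCE B (Python) =====
-- def initial_prune(contains_dicts, correct_letters_wrong_place, correct_letters_exact_place):
--     letters = [v[1] for v in correct_letters_wrong_place] + \
--               [v[1] for v in correct_letters_exact_place]
--     pools = [contains_dicts[ord(c) - ord('a')] for c in letters]
--     first, rest = pools[0], pools[1:]
--     return {w for w in first if all(w in p for p in rest)}
-- ===== Notes on version B (the rewrite author's own statement) =====
-- stated objective: alternative
-- what changed: Instead of repeatedly materialising intermediate intersection sets in a loop, B resolves each letter to its set once, then makes a single filtering pass over the first set keeping the words contained in all remaining sets.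
import Mathlib
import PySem

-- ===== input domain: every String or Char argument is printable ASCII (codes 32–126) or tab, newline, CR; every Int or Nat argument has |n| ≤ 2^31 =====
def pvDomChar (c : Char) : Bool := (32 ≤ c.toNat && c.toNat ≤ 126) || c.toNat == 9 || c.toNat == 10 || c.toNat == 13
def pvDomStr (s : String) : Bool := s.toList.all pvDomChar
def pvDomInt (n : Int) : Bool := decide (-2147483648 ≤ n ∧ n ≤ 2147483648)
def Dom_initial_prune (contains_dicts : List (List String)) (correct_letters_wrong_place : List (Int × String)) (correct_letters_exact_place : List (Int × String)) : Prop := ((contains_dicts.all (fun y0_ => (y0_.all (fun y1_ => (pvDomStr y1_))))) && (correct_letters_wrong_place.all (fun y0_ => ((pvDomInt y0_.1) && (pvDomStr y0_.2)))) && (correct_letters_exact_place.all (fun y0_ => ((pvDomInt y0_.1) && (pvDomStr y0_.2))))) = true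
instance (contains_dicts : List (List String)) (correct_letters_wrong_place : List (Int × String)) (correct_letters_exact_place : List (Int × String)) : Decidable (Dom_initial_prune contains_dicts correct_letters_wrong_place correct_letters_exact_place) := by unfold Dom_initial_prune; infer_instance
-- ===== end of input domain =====

-- B replaces A's loop of repeated set intersections by one membership-filter pass over the
-- first letter's set (objective: alternative decomposition, same cost class).

-- ===== PORT A =====
-- ord(s) - ord('a') for a one-character string s (Python ord raises TypeError otherwise;
-- such inputs are excluded by Pre_, the `_ => 0` branch is never reached under Pre_)
def lidx (s : String) : Int :=
  match s.toList with
  | [c] => (c.toNat : Int) - 97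
  | _ => 0

-- helper contains_shrink of A, transliterated: index the first letter's set, copy it,
-- then loop over the remaining letters intersecting (list indexing via pyGetD; Pre_
-- guarantees every index is in Python range)
def contains_shrink (contains_dicts : List (List String)) (lt : List String) : List String :=
  let f := lidx (PySem.List.pyGetD lt 0 "")
  let d := PySem.List.pyGetD contains_dicts f []
  (lt.drop 1).foldl
    (fun d c => PySem.Set.inter d (PySem.List.pyGetD contains_dicts (lidx c) [])) d

def initial_prune (contains_dicts : List (List String)) (correct_letters_wrong_place : List (Int × String)) (correct_letters_exact_place : List (Int × String)) : List String :=
  let letters := correct_letters_wrong_place.foldl (fun acc val => acc ++ [val.2]) []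
  let letters := correct_letters_exact_place.foldl (fun acc val => acc ++ [val.2]) letters
  contains_shrink contains_dicts letters

-- ===== PORT B =====
def initial_prune_alt (contains_dicts : List (List String)) (correct_letters_wrong_place : List (Int × String)) (correct_letters_exact_place : List (Int × String)) : List String :=
  let letters := correct_letters_wrong_place.map (fun v => v.2) ++
                 correct_letters_exact_place.map (fun v => v.2)
  let pools := letters.map (fun c => PySem.List.pyGetD contains_dicts (lidx c) [])
  match pools with
  | [] => []  -- unreachable under Pre_ (pools[0] raises IndexError in Python)
  | first :: rest =>
      PySem.Set.ofList (first.filter (fun w => rest.all (fun p => PySem.Set.contains p w)))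

-- ===== PRECONDITION & SPEC =====
-- Pre_ admits exactly the inputs where the Python A returns: at least one letter tuple
-- (else letters[0] raises IndexError), every tuple's second component a single character
-- (else ord raises TypeError) whose index ord(c)-ord('a') is a valid Python index into
-- contains_dicts (else IndexError); additionally each inner list must be Nodup because it
-- models a Python set (the type convention's representation of set[str]).
def Pre_initial_prune (contains_dicts : List (List String)) (correct_letters_wrong_place : List (Int × String)) (correct_letters_exact_place : List (Int × String)) : Prop :=
  (correct_letters_wrong_place ≠ [] ∨ correct_letters_exact_place ≠ []) ∧
  (∀ p ∈ correct_letters_wrong_place ++ correct_letters_exact_place,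
      p.2.toList.length = 1 ∧ PySem.Raise.InRange contains_dicts.length (lidx p.2)) ∧
  (∀ d ∈ contains_dicts, d.Nodup)
instance (contains_dicts : List (List String)) (correct_letters_wrong_place : List (Int × String)) (correct_letters_exact_place : List (Int × String)) : Decidable (Pre_initial_prune contains_dicts correct_letters_wrong_place correct_letters_exact_place) := by unfold Pre_initial_prune; infer_instance

def pvWitness_initial_prune : List (List String) × (List (Int × String)) × (List (Int × String)) :=
  ([["able", "cable"], ["cable", "bad"]], [(0, "a")], [(2, "b")])

def Spec_initial_prune (contains_dicts : List (List String)) (correct_letters_wrong_place : List (Int × String)) (correct_letters_exact_place : List (Int × String)) (out : List String) : Prop := out = initial_prune_alt contains_dicts correct_letters_wrong_place correct_letters_exact_place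
instance (contains_dicts : List (List String)) (correct_letters_wrong_place : List (Int × String)) (correct_letters_exact_place : List (Int × String)) (out : List String) : Decidable (Spec_initial_prune contains_dicts correct_letters_wrong_place correct_letters_exact_place out) := by unfold Spec_initial_prune; infer_instance

-- ===== CLAIM (what is proved, stated in full; the proofs are below) =====
def Claim_equal_initial_prune : Prop := ∀ (contains_dicts : List (List String)) (correct_letters_wrong_place : List (Int × String)) (correct_letters_exact_place : List (Int × String)), Dom_initial_prune contains_dicts correct_letters_wrong_place correct_letters_exact_place → Pre_initial_prune contains_dicts correct_letters_wrong_place correct_letters_exact_place → Spec_initial_prune contains_dicts correct_letters_wrong_place correct_letters_exact_place (initial_prune contains_dicts correct_letters_wrong_place correct_letters_exact_place)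

-- ===== LEMMAS AND PROOFS =====

-- a fold of pairwise intersections is one filter by membership in every set
lemma foldl_inter_eq_filter (ps : List (List String)) (s : List String) :
    ps.foldl PySem.Set.inter s
      = s.filter (fun w => ps.all (fun p => PySem.Set.contains p w)) := by
  induction ps generalizing s with
  | nil => simp
  | cons t ps ih =>
      simp only [List.foldl_cons, ih, PySem.Set.inter, List.filter_filter, List.all_cons]
      congr 1
      funext a
      exact Bool.and_comm _ _

-- pyGetD returns an element of the list or the default
lemma pyGetD_mem_or_default {α : Type} (xs : List α) (i : Int) (d : α) :
    PySem.List.pyGetD xs i d ∈ xs ∨ PySem.List.pyGetD xs i d = d := by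
  simp only [PySem.List.pyGetD]
  cases h : PySem.List.pyGet? xs i with
  | none => right; rfl
  | some y =>
      left
      exact PySem.List.mem_of_pyGet?_eq_some xs h

-- ===== VERDICT (by name: the statement is the Claim_ definition above) =====
theorem initial_prune_spec : Claim_equal_initial_prune := by
  intro cd w e _ hpre
  obtain ⟨hne, -, hnodup⟩ := hpre
  unfold Spec_initial_prune initial_prune initial_prune_alt contains_shrink
  simp only [PySem.List.foldl_append_singleton_eq_map, List.nil_append]
  cases hL : w.map (fun v => v.2) ++ e.map (fun v => v.2) with
  | nil =>
      exfalso
      rcases List.append_eq_nil_iff.mp hL with ⟨h1, h2⟩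
      cases hne with
      | inl h => exact h (List.map_eq_nil_iff.mp h1)
      | inr h => exact h (List.map_eq_nil_iff.mp h2)
  | cons c rest =>
      simp only [List.map_cons, List.drop_succ_cons, List.drop_zero,
        PySem.List.pyGetD_ofNat', List.getD_cons_zero]
      rw [← List.foldl_map (f := fun c => PySem.List.pyGetD cd (lidx c) []),
        foldl_inter_eq_filter]
      have hfirst : (PySem.List.pyGetD cd (lidx c) []).Nodup := by
        rcases pyGetD_mem_or_default cd (lidx c) [] with hm | hd
        · exact hnodup _ hm
        · rw [hd]; exact List.nodup_nil
      rw [PySem.Set.ofList_eq_self_of_nodup _ (hfirst.filter _)]
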